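-- pv_equiv track=rewrite | github.com/na399/Binf | SB/exam/exam_RNA.py | bp_distance
-- ===== SOURCE A (Python) =====
-- def pair_list(seq):
--
--     stack = []
--     listPairs = []
--
--     for i in range(0, len(seq)):
--
--         if list(seq)[i] == '(':
--             stack.append(i)
--         if list(seq)[i] == ')':
--             listPairs.append((stack[-1],i))
--             del stack[-1]
--
--     return listPairs
--
-- def bp_distance(WT, MT):
--
--     WT_pairs = pair_list(WT)
--     MT_pairs = pair_list(MT)
--
--     distance = 0
--
--     for i in WT_pairs:
--         if i not in MT_pairs:
--             distance += 1
--
--     for i in MT_pairs: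
--         if i not in WT_pairs:
--             distance += 1
--
--     return distance
-- ===== SOURCE B (Python) =====
-- def bp_distance(WT, MT):
--     # Recursive-descent parse: partner map keyed by closing index; distance =
--     # number of closing brackets whose partner disagrees between the two maps.
--     def partner_map(s):
--         pm = {}
--         def rec(i):
--             # parse items from index i; stop at an unmatched ')' or at len(s)
--             while i < len(s):
--                 if s[i] == '(':
--                     j = rec(i + 1)
--                     if j == len(s):
--                         return j      # unmatched '(' : no pair recorded
--                     pm[j] = i         # s[j] is the matching ')'
--                     i = j + 1
--                 elif s[i] == ')':
--                     return i
--                 else: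
--                     i += 1
--             return i
--         rec(0)
--         return pm
--     W = partner_map(WT)
--     M = partner_map(MT)
--     d = 0
--     for j, i in W.items():
--         if M.get(j) != i:
--             d += 1
--     for j, i in M.items():
--         if W.get(j) != i:
--             d += 1
--     return d
-- ===== Notes on version B (the rewrite author's own statement) =====
-- stated objective: faster
-- what changed: B replaces A's stack scan (which copies list(seq) at every index) and its two quadratic not-in membership loops by a recursive-descent parser that builds a partner dictionary keyed by closing-bracket index, and counts the closing indices whose partner disagrees between the two dictionaries via O(1) dict lookups.
import Mathlib
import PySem

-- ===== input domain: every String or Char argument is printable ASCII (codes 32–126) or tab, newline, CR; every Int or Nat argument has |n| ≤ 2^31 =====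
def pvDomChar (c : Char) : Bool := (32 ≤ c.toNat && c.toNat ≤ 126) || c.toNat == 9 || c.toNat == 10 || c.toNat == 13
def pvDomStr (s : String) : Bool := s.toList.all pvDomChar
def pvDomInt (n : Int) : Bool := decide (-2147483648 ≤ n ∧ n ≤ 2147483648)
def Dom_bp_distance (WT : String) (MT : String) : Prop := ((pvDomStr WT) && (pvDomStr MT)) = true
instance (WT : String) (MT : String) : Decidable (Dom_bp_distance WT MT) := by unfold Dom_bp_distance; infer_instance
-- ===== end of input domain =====

-- B replaces A's quadratic stack scan + membership loops by a recursive-descent parser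
-- building a partner dictionary keyed by closing index, counting disagreeing entries.

-- ===== PORT A =====
-- loop body of pair_list: ic = (i, seq[i]); two sequential ifs as in the Python
def pvStepA (acc : List Int × List (Int × Int)) (ic : Int × Char) :
    List Int × List (Int × Int) :=
  let acc1 := if ic.2 = '(' then (acc.1 ++ [ic.1], acc.2) else acc
  if ic.2 = ')' then
    (acc1.1.dropLast, acc1.2 ++ [(acc1.1.getLast?.getD 0, ic.1)])  -- stack[-1]; default unreachable: ')' with empty stack raises, excluded by Pre_
  else acc1

def pair_list (seq : String) : List (Int × Int) :=
  let cs := seq.toList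
  ((PySem.List.pyRange 0 (PySem.List.len cs) 1).foldl
      (fun acc i => pvStepA acc (i, PySem.List.pyGetD cs i ' ')) ([], [])).2

def bp_distance (WT : String) (MT : String) : Int :=
  let WT_pairs := pair_list WT
  let MT_pairs := pair_list MT
  let distance : Int := 0
  let distance := WT_pairs.foldl (fun d i => if i ∉ MT_pairs then d + 1 else d) distance
  MT_pairs.foldl (fun d i => if i ∉ WT_pairs then d + 1 else d) distance

-- ===== PORT B =====
-- B's rec, ported over the remaining suffix with the absolute index i carried along;
-- fuel (2*len+1 suffices) makes the recursion structural; returns (pm, stop index, rest).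
def pvRec : Nat → Int → List Char → PySem.Dict Int Int →
    PySem.Dict Int Int × Int × List Char
  | 0, i, cs, pm => (pm, i, cs)            -- fuel exhaustion; unreachable with fuel = 2*len+1
  | _ + 1, i, [], pm => (pm, i, [])
  | fuel + 1, i, c :: t, pm =>
    if c = '(' then
      match pvRec fuel (i + 1) t pm with
      | (pm1, j, []) => (pm1, j, [])       -- unmatched '(' : no pair recorded
      | (pm1, j, _ :: t2) => pvRec fuel (j + 1) t2 (pm1.insert j i)
    else if c = ')' then (pm, i, c :: t)
    else pvRec fuel (i + 1) t pm

def pvPartnerMap (s : String) : PySem.Dict Int Int :=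
  (pvRec (2 * s.toList.length + 1) 0 s.toList PySem.Dict.empty).1

def bp_distance_alt (WT : String) (MT : String) : Int :=
  let W := pvPartnerMap WT
  let M := pvPartnerMap MT
  let d : Int := 0
  let d := W.items.foldl (fun d p => if M.get? p.1 ≠ some p.2 then d + 1 else d) d
  M.items.foldl (fun d p => if W.get? p.1 ≠ some p.2 then d + 1 else d) d

-- ===== PRECONDITION & SPEC =====
-- Pre_ excludes exactly the inputs where Python A raises IndexError (stack[-1] on an empty
-- stack): some prefix of WT or MT contains more ')' than '('.
def pvBalancedPrefixes (cs : List Char) : Prop :=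
  ∀ n ∈ List.range (cs.length + 1), (cs.take n).count ')' ≤ (cs.take n).count '('

def Pre_bp_distance (WT : String) (MT : String) : Prop :=
  pvBalancedPrefixes WT.toList ∧ pvBalancedPrefixes MT.toList

instance (WT : String) (MT : String) : Decidable (Pre_bp_distance WT MT) := by
  unfold Pre_bp_distance pvBalancedPrefixes; infer_instance

def pvWitness_bp_distance : String × String := ("((.))", "(.)()")

def Spec_bp_distance (WT : String) (MT : String) (out : Int) : Prop := out = bp_distance_alt WT MT
instance (WT : String) (MT : String) (out : Int) : Decidable (Spec_bp_distance WT MT out) := by unfold Spec_bp_distance; infer_instance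

-- ===== CLAIM (what is proved, stated in full; the proofs are below) =====
def Claim_equal_bp_distance : Prop := ∀ (WT : String) (MT : String), Dom_bp_distance WT MT → Pre_bp_distance WT MT → Spec_bp_distance WT MT (bp_distance WT MT)

-- ===== LEMMAS AND PROOFS =====

-- A's fold over the suffix cs starting at absolute index i, with stack st and pairs ps
def pvFoldA (cs : List Char) (i : Int) (st : List Int) (ps : List (Int × Int)) :
    List Int × List (Int × Int) :=
  (PySem.List.enumerate cs i).foldl pvStepA (st, ps)

lemma pair_list_eq_foldA (seq : String) :
    pair_list seq = (pvFoldA seq.toList 0 [] []).2 := by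
  unfold pair_list pvFoldA
  rw [PySem.List.enumerate_eq_map_pyRange seq.toList ' ', List.foldl_map]

lemma pvFoldA_nil (i : Int) (st : List Int) (ps : List (Int × Int)) :
    pvFoldA [] i st ps = (st, ps) := rfl

lemma pvFoldA_cons (c : Char) (t : List Char) (i : Int) (st : List Int)
    (ps : List (Int × Int)) :
    pvFoldA (c :: t) i st ps = pvFoldA t (i + 1) (pvStepA (st, ps) (i, c)).1 (pvStepA (st, ps) (i, c)).2 := by
  unfold pvFoldA
  rw [PySem.List.enumerate_cons]
  simp

lemma pvFoldA_append (u v : List Char) (i : Int) (st : List Int) (ps : List (Int × Int)) :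
    pvFoldA (u ++ v) i st ps = pvFoldA v (i + u.length) (pvFoldA u i st ps).1 (pvFoldA u i st ps).2 := by
  unfold pvFoldA
  rw [PySem.List.enumerate_append, List.foldl_append]

-- MAIN: correspondence of B's recursive descent with A's stack fold.
lemma pvRec_main :
    ∀ (fuel : Nat) (cs : List Char) (i : Int) (pm : PySem.Dict Int Int)
      (pm' : PySem.Dict Int Int) (j : Int) (rest : List Char),
    pvRec fuel i cs pm = (pm', j, rest) →
    2 * cs.length + 1 ≤ fuel →
    (∀ k ∈ pm.keys, k < i) → pm.keys.Nodup →
    ∃ pre new,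
      cs = pre ++ rest
      ∧ j = i + (pre.length : Int)
      ∧ pm'.items = pm.items ++ new.map (fun p => (p.2, p.1))
      ∧ (∀ k ∈ pm'.keys, k < j)
      ∧ pm'.keys.Nodup
      ∧ (rest = [] → ∀ st ps, (pvFoldA cs i st ps).2 = ps ++ new)
      ∧ (rest ≠ [] →
          (∃ t2, rest = ')' :: t2)
          ∧ pre.count '(' = pre.count ')'
          ∧ ∀ st ps, pvFoldA pre i st ps = (st, ps ++ new)) := by
  intro fuel
  induction fuel with
  | zero => intro cs i pm pm' j rest _ hf; omega
  | succ fuel ih =>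
    intro cs i pm pm' j rest hr hf hkeys hnd
    match cs with
    | [] =>
      simp only [pvRec, Prod.mk.injEq] at hr
      obtain ⟨rfl, rfl, rfl⟩ := hr
      refine ⟨[], [], by simp, by simp, by simp, hkeys, hnd, ?_, by simp⟩
      intro _ st ps; simp [pvFoldA_nil]
    | c :: t =>
      by_cases hc : c = '('
      · rw [show pvRec (fuel+1) i (c::t) pm =
              (match pvRec fuel (i+1) t pm with
               | (pm1, j1, []) => (pm1, j1, [])
               | (pm1, j1, _ :: t2) => pvRec fuel (j1+1) t2 (pm1.insert j1 i)) by
            simp [pvRec, hc]] at hr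
        rcases hr1 : pvRec fuel (i+1) t pm with ⟨pm1, j1, rest1⟩
        rw [hr1] at hr
        obtain ⟨pre1, new1, ht, hj1, hit1, hk1, hnd1, hclosed1, hstop1⟩ :=
          ih t (i+1) pm pm1 j1 rest1 hr1 (by simp at hf ⊢; omega)
            (fun k hk => lt_trans (hkeys k hk) (by omega)) hnd
        cases rest1 with
        | nil =>
          simp only [Prod.mk.injEq] at hr
          obtain ⟨rfl, rfl, rfl⟩ := hr
          refine ⟨c :: pre1, new1, by simp [ht], by rw [hj1]; push_cast [List.length_cons]; ring,
            hit1, hk1, hnd1, ?_, by simp⟩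
          intro _ st ps
          rw [pvFoldA_cons, show pvStepA (st, ps) (i, c) = (st ++ [i], ps) by
            simp [pvStepA, hc]]
          exact hclosed1 rfl (st ++ [i]) ps
        | cons r t2 =>
          simp only at hr
          obtain ⟨⟨t2x, hro⟩, hcnt1, hpre1⟩ := hstop1 (by simp)
          obtain ⟨h1, h2⟩ := List.cons_eq_cons.mp hro
          subst h1; subst h2
          -- freshness of the key j1 in pm1
          have hfresh : pm1.contains j1 = false := by
            rw [PySem.Dict.contains_eq_decide_mem_keys]
            simp only [decide_eq_false_iff_not]
            intro hmem
            exact absurd (hk1 j1 hmem) (lt_irrefl j1)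
          obtain ⟨pre2, new2, ht2, hj2, hit2, hk2, hnd2, hclosed2, hstop2⟩ :=
            ih t2 (j1+1) (pm1.insert j1 i) pm' j rest hr
              (by
                have h1 : t.length = pre1.length + (t2.length + 1) := by
                  rw [ht]; simp
                simp at hf; omega)
              (by
                intro k hk
                rw [PySem.Dict.keys_insert_of_not_contains _ _ hfresh] at hk
                rcases List.mem_append.mp hk with h | h
                · exact lt_trans (hk1 k h) (by omega)
                · simp at h; omega)
              (by
                rw [PySem.Dict.keys_insert_of_not_contains _ _ hfresh]
                refine List.Nodup.append hnd1 (List.nodup_singleton _) ?_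
                intro k hk hk2
                simp only [List.mem_singleton] at hk2
                subst hk2
                exact absurd (hk1 k hk) (lt_irrefl k))
          have hins : (pm1.insert j1 i).items = pm1.items ++ [(j1, i)] :=
            PySem.Dict.items_insert_of_not_contains _ _ hfresh
          -- assemble
          refine ⟨c :: pre1 ++ ')' :: pre2, new1 ++ (i, j1) :: new2, ?_, ?_, ?_, ?_, hnd2, ?_, ?_⟩
          · rw [ht, ht2]; simp [hc]
          · rw [hj2, hj1]; push_cast [List.length_cons, List.length_append]; ring
          · rw [hit2, hins, hit1]; simp
          · exact hk2
          · -- rest = []: pairs of the A-fold over cs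
            intro hrest st ps
            rw [ht, pvFoldA_cons, show pvStepA (st, ps) (i, c) = (st ++ [i], ps) by
              simp [pvStepA, hc]]
            rw [pvFoldA_append, hpre1 (st ++ [i]) ps]
            dsimp only
            rw [← hj1, pvFoldA_cons]
            have hstep : pvStepA (st ++ [i], ps ++ new1) (j1, ')')
                = (st, ps ++ new1 ++ [(i, j1)]) := by
              simp [pvStepA]
            rw [hstep]
            dsimp only
            rw [hclosed2 hrest st (ps ++ new1 ++ [(i, j1)])]
            simp
          · -- rest ≠ []: full fold over pre
            intro hne
            obtain ⟨hex2, hcnt2, hfold2⟩ := hstop2 hne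
            refine ⟨hex2, ?_, ?_⟩
            · simp [List.count_append, hc, hcnt1, hcnt2]
              try omega
            · intro st ps
              rw [show (c :: pre1 ++ ')' :: pre2 : List Char) = c :: (pre1 ++ ')' :: pre2) from rfl]
              rw [pvFoldA_cons, show pvStepA (st, ps) (i, c) = (st ++ [i], ps) by
                simp [pvStepA, hc]]
              rw [pvFoldA_append, hpre1 (st ++ [i]) ps]
              dsimp only
              rw [← hj1, pvFoldA_cons]
              have hstep : pvStepA (st ++ [i], ps ++ new1) (j1, ')')
                  = (st, ps ++ new1 ++ [(i, j1)]) := by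
                simp [pvStepA]
              rw [hstep]
              dsimp only
              rw [hfold2 st (ps ++ new1 ++ [(i, j1)])]
              simp
      · by_cases hc2 : c = ')'
        · rw [show pvRec (fuel+1) i (c::t) pm = (pm, i, c :: t) by simp [pvRec, hc2]] at hr
          simp only [Prod.mk.injEq] at hr
          obtain ⟨rfl, rfl, rfl⟩ := hr
          refine ⟨[], [], by simp, by simp, by simp, hkeys, hnd, by simp, ?_⟩
          intro _
          exact ⟨⟨t, by rw [hc2]⟩, rfl, fun st ps => by simp [pvFoldA_nil]⟩
        · rw [show pvRec (fuel+1) i (c::t) pm = pvRec fuel (i+1) t pm by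
            simp [pvRec, hc, hc2]] at hr
          obtain ⟨pre1, new1, ht, hj1, hit1, hk1, hnd1, hclosed1, hstop1⟩ :=
            ih t (i+1) pm pm' j rest hr (by simp at hf ⊢; omega)
              (fun k hk => lt_trans (hkeys k hk) (by omega)) hnd
          refine ⟨c :: pre1, new1, by simp [ht], by rw [hj1]; push_cast [List.length_cons]; ring,
            hit1, hk1, hnd1, ?_, ?_⟩
          · intro h st ps
            rw [pvFoldA_cons, show pvStepA (st, ps) (i, c) = (st, ps) by
              simp [pvStepA, hc, hc2]]
            exact hclosed1 h st ps
          · intro hne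
            obtain ⟨hex, hcnt, hfold⟩ := hstop1 hne
            refine ⟨hex, by simp [hc, hc2, hcnt], ?_⟩
            intro st ps
            rw [pvFoldA_cons, show pvStepA (st, ps) (i, c) = (st, ps) by
              simp [pvStepA, hc, hc2]]
            exact hfold st ps

-- at the top level, on a balanced-prefix string, rec consumes everything
lemma pvPartnerMap_items (s : String) (h : pvBalancedPrefixes s.toList) :
    (pvPartnerMap s).items = (pair_list s).map (fun p => (p.2, p.1))
    ∧ (pvPartnerMap s).keys.Nodup := by
  rcases hr : pvRec (2 * s.toList.length + 1) 0 s.toList PySem.Dict.empty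
    with ⟨pm', j, rest⟩
  obtain ⟨pre, new, hsplit, _, hitems, _, hnd, hclosed, hstop⟩ :=
    pvRec_main _ s.toList 0 PySem.Dict.empty pm' j rest hr le_rfl
      (by simp [PySem.Dict.keys_empty]) (by simp [PySem.Dict.keys_empty])
  have hrest : rest = [] := by
    by_contra hne
    obtain ⟨⟨t2, ht2⟩, hcnt, _⟩ := hstop hne
    have hlen : s.toList.length = pre.length + (t2.length + 1) := by
      rw [hsplit, ht2]; simp
    have hn : pre.length + 1 ∈ List.range (s.toList.length + 1) := by
      rw [List.mem_range]; omega
    have hb := h (pre.length + 1) hn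
    have htake : s.toList.take (pre.length + 1) = pre ++ [')'] := by
      rw [hsplit, ht2, show pre ++ ')' :: t2 = (pre ++ [')']) ++ t2 by simp]
      exact List.take_left' (by simp)
    rw [htake] at hb
    simp [List.count_append, hcnt] at hb
  subst hrest
  constructor
  · rw [pvPartnerMap, hr]
    dsimp only
    rw [hitems, pair_list_eq_foldA, hclosed rfl [] []]
    simp [show PySem.Dict.empty.items = ([] : List (Int × Int)) from rfl]
  · rw [pvPartnerMap, hr]
    exact hnd

-- counting loop equality
lemma pvCount_eq (P Q : List (Int × Int)) (M : PySem.Dict Int Int)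
    (hM : M.items = Q.map (fun p => (p.2, p.1))) (hnd : M.keys.Nodup) (a : Int) :
    (P.map (fun p => (p.2, p.1))).foldl (fun d p => if M.get? p.1 ≠ some p.2 then d + 1 else d) a
      = P.foldl (fun d i => if i ∉ Q then d + 1 else d) a := by
  rw [List.foldl_map]
  refine PySem.List.foldl_congr_mem _ _ _ _ ?_
  intro acc p _
  have hiff : M.get? p.2 = some p.1 ↔ p ∈ Q := by
    rw [PySem.Dict.get?_eq_some_iff_mem_items _ _ _ hnd, hM, List.mem_map]
    constructor
    · rintro ⟨q, hq, hqe⟩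
      simp only [Prod.mk.injEq] at hqe
      have : q = p := Prod.ext hqe.2 hqe.1
      exact this ▸ hq
    · intro hp
      exact ⟨p, hp, rfl⟩
  by_cases hp : p ∈ Q
  · simp [hiff.mpr hp, hp]
  · have : M.get? p.2 ≠ some p.1 := fun hce => hp (hiff.mp hce)
    simp [this, hp]

-- ===== VERDICT (by name: the statement is the Claim_ definition above) =====
theorem bp_distance_spec : Claim_equal_bp_distance := by
  intro WT MT _ hpre
  unfold Spec_bp_distance bp_distance bp_distance_alt
  dsimp only
  obtain ⟨hW, hWnd⟩ := pvPartnerMap_items WT hpre.1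
  obtain ⟨hM, hMnd⟩ := pvPartnerMap_items MT hpre.2
  rw [hW, hM]
  rw [pvCount_eq (pair_list WT) (pair_list MT) _ hM hMnd,
      pvCount_eq (pair_list MT) (pair_list WT) _ hW hWnd]
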